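-- pv_equiv track=rewrite | github.com/wirtzzz/tipe-esther-andreas | estimation.py | count_sol
-- ===== SOURCE A (Python) =====
-- def count_sol(m):
--     sol={}
--     for i in range(len(m)):
--         for j in range(len(m[0])):
--             for a,b in m[i][j][1]:
--                 if a not in sol:
--                     sol[a]={'l':1,(a,b):1}
--                 elif (a,b) not in sol[a]:
--                     sol[a][a,b]=1
--                     sol[a]['l']+=1
--     p=1
--     for key in sol:
--         p*=sol[key]['l']
--     return p
-- ===== SOURCE B (Python) =====
-- def count_sol(m):
--     pairs = []
--     for i in range(len(m)):
--         for j in range(len(m[0])):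
--             pairs.extend(m[i][j][1])
--     pairs.sort()
--     uniq = []
--     for q in pairs:
--         if not uniq or uniq[-1] != q:
--             uniq.append(q)
--     firsts = [a for a, b in uniq]
--     keys = []
--     for a in firsts:
--         if not keys or keys[-1] != a:
--             keys.append(a)
--     p = 1
--     for a in keys:
--         p *= firsts.count(a)
--     return p
-- ===== Notes on version B (the rewrite author's own statement) =====
-- stated objective: alternative
-- what changed: Replaces A's incremental hash-dict-of-dicts distinct counting by a sort-based pipeline with no dict or set at all: flatten all (a,b) pairs, sort them lexicographically, compress adjacent duplicates, compress the sorted key column to get the distinct keys, and multiply each key's multiplicity in the deduplicated key column.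
-- outside the precondition, e.g. on count_sol([[(1, [(1, 2)]), (2, [])], [(3, [(4, 5)])]]): A raises IndexError, B raises IndexError
import Mathlib
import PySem

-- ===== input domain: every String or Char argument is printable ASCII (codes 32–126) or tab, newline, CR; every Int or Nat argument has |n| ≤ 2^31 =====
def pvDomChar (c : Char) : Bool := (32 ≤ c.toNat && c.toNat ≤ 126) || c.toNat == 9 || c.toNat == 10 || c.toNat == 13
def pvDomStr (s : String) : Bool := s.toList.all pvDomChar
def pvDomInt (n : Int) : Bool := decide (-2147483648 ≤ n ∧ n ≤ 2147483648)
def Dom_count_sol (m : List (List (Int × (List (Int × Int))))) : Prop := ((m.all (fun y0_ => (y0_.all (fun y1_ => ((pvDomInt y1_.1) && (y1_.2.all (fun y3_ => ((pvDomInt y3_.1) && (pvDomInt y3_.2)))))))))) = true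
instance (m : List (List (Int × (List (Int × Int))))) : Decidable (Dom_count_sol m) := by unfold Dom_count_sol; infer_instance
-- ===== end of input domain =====

-- B replaces A's hash-dict incremental distinct counting by a sort-based pipeline
-- (sort all pairs, compress adjacent duplicates, compress the key column, multiply counts):
-- objective 'alternative'.

-- ===== PORT A =====
-- A's inner dict {'l': n, (a,b): 1, …} has mixed-type keys; it is modelled exactly as the pair
-- (n, dict of the (a,b) keys): 'l' is the first component, tuple keys live in the second.
def solStep (sol : PySem.Dict Int (Int × PySem.Dict (Int × Int) Int)) (ab : Int × Int) :
    PySem.Dict Int (Int × PySem.Dict (Int × Int) Int) :=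
  match sol.get? ab.1 with
  | none => sol.insert ab.1 (1, PySem.Dict.empty.insert ab 1)       -- sol[a] = {'l':1,(a,b):1}
  | some (l, d) =>
    match d.get? ab with
    | none => sol.insert ab.1 (l + 1, d.insert ab 1)                -- sol[a][a,b]=1; sol[a]['l']+=1
    | some _ => sol

-- m[i][j] out of range is Python's IndexError (excluded by Pre_); '.getD' only makes the port total there.
def count_sol (m : List (List (Int × (List (Int × Int))))) : Int :=
  let sol := (PySem.List.pyRange 0 (m.length : Int) 1).foldl (fun sol i =>
    (PySem.List.pyRange 0 (((PySem.List.pyGet? m 0).getD []).length : Int) 1).foldl (fun sol j =>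
      ((PySem.List.pyGet? ((PySem.List.pyGet? m i).getD []) j).getD (0, [])).2.foldl solStep sol)
      sol) PySem.Dict.empty
  sol.values.foldl (fun p v => p * v.1) 1

-- ===== PORT B =====
-- the 'if not out or out[-1] != x: out.append(x)' loop of Source B (used twice there);
-- out[-1] on a nonempty list is exactly List.getLast?
def dedupAdj {α : Type} [DecidableEq α] (l : List α) : List α :=
  l.foldl (fun u x => if u = [] ∨ u.getLast? ≠ some x then u ++ [x] else u) []

def count_sol_alt (m : List (List (Int × (List (Int × Int))))) : Int :=
  let pairs := (PySem.List.pyRange 0 (m.length : Int) 1).foldl (fun l i =>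
    (PySem.List.pyRange 0 (((PySem.List.pyGet? m 0).getD []).length : Int) 1).foldl (fun l j =>
      l ++ ((PySem.List.pyGet? ((PySem.List.pyGet? m i).getD []) j).getD (0, [])).2) l) []
  let uniq := dedupAdj (PySem.List.sorted2 pairs Prod.fst Prod.snd)   -- pairs.sort() of int tuples
  let firsts := uniq.map Prod.fst
  let keys := dedupAdj firsts
  keys.foldl (fun p a => p * (PySem.List.count firsts a : Int)) 1

-- ===== PRECONDITION & SPEC =====
-- Python A indexes every row at each j < len(m[0]); on a jagged matrix with a row shorter than
-- the first it raises IndexError — exactly those inputs are excluded.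
def Pre_count_sol (m : List (List (Int × (List (Int × Int))))) : Prop :=
  ∀ row ∈ m, (m.headD []).length ≤ row.length
instance (m : List (List (Int × (List (Int × Int))))) : Decidable (Pre_count_sol m) := by
  unfold Pre_count_sol; infer_instance

def pvWitness_count_sol : (List (List (Int × (List (Int × Int))))) :=
  [[(1, [(1, 2), (1, 3)]), (0, [(2, 5)])], [(5, [(1, 2)]), (7, [])]]

def Spec_count_sol (m : List (List (Int × (List (Int × Int))))) (out : Int) : Prop := out = count_sol_alt m
instance (m : List (List (Int × (List (Int × Int))))) (out : Int) : Decidable (Spec_count_sol m out) := by unfold Spec_count_sol; infer_instance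

-- ===== CLAIM (what is proved, stated in full; the proofs are below) =====
def Claim_equal_count_sol : Prop := ∀ (m : List (List (Int × (List (Int × Int))))), Dom_count_sol m → Pre_count_sol m → Spec_count_sol m (count_sol m)

-- ===== LEMMAS AND PROOFS =====

-- the pairs of m in the order both programs visit them
def flatPairs (m : List (List (Int × (List (Int × Int))))) : List (Int × Int) :=
  (PySem.List.pyRange 0 (m.length : Int) 1).flatMap (fun i =>
    (PySem.List.pyRange 0 (((PySem.List.pyGet? m 0).getD []).length : Int) 1).flatMap (fun j =>
      ((PySem.List.pyGet? ((PySem.List.pyGet? m i).getD []) j).getD (0, [])).2))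

lemma nested_foldl {σ : Type} (m : List (List (Int × (List (Int × Int))))) (f : σ → Int × Int → σ)
    (init : σ) :
    ((PySem.List.pyRange 0 (m.length : Int) 1).foldl (fun s i =>
      (PySem.List.pyRange 0 (((PySem.List.pyGet? m 0).getD []).length : Int) 1).foldl (fun s j =>
        ((PySem.List.pyGet? ((PySem.List.pyGet? m i).getD []) j).getD (0, [])).2.foldl f s) s) init)
    = (flatPairs m).foldl f init := by
  simp [flatPairs, List.foldl_flatMap]

-- Source B's pairs-collection loop ('pairs.extend(...)') builds exactly flatPairs m
lemma nested_append (m : List (List (Int × (List (Int × Int))))) :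
    ((PySem.List.pyRange 0 (m.length : Int) 1).foldl (fun l i =>
      (PySem.List.pyRange 0 (((PySem.List.pyGet? m 0).getD []).length : Int) 1).foldl (fun l j =>
        l ++ ((PySem.List.pyGet? ((PySem.List.pyGet? m i).getD []) j).getD (0, [])).2) l) [])
    = flatPairs m := by
  have h1 : ∀ (acc : List (Int × Int)) (i : Int),
      i ∈ PySem.List.pyRange 0 (m.length : Int) 1 →
      ((PySem.List.pyRange 0 (((PySem.List.pyGet? m 0).getD []).length : Int) 1).foldl (fun l j =>
        l ++ ((PySem.List.pyGet? ((PySem.List.pyGet? m i).getD []) j).getD (0, [])).2) acc)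
      = acc ++ (PySem.List.pyRange 0 (((PySem.List.pyGet? m 0).getD []).length : Int) 1).flatMap
          (fun j => ((PySem.List.pyGet? ((PySem.List.pyGet? m i).getD []) j).getD (0, [])).2) := by
    intro acc i _
    exact PySem.List.foldl_append_eq_flatMap _ _ _
  refine Eq.trans (PySem.List.foldl_congr_mem _ _ _ _ h1) ?_
  rw [PySem.List.foldl_append_eq_flatMap]
  simp [flatPairs]

-- invariant linking A's dict-of-dicts to the list P of distinct pairs seen so far
def InvA (sol : PySem.Dict Int (Int × PySem.Dict (Int × Int) Int)) (P : List (Int × Int)) : Prop :=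
  sol.keys = PySem.Set.ofList (P.map Prod.fst) ∧
  sol.keys.Nodup ∧
  ∀ a l d, sol.get? a = some (l, d) →
    l = ((P.filter (fun p => p.1 == a)).length : Int) ∧
    ∀ x : Int × Int, ((d.get? x).isSome = true ↔ (x ∈ P ∧ x.1 = a))

lemma ofList_append_singleton {α : Type} [BEq α] (l : List α) (x : α) :
    PySem.Set.ofList (l ++ [x]) = PySem.Set.add (PySem.Set.ofList l) x := by
  simp [PySem.Set.ofList_eq_foldl, List.foldl_append]

lemma inv_step (sol : PySem.Dict Int (Int × PySem.Dict (Int × Int) Int)) (P : List (Int × Int))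
    (ab : Int × Int) (h : InvA sol P) : InvA (solStep sol ab) (PySem.Set.add P ab) := by
  obtain ⟨hkeys, hnd, hval⟩ := h
  by_cases hab : ab ∈ P
  · -- already seen: both sides are unchanged
    have hadd : PySem.Set.add P ab = P := by simp [PySem.Set.add, PySem.Set.contains, hab]
    have hmemk : ab.1 ∈ sol.keys := by
      rw [hkeys, PySem.Set.mem_ofList]; exact List.mem_map_of_mem hab
    cases hg : sol.get? ab.1 with
    | none => exact absurd ((PySem.Dict.get?_eq_none_iff_not_mem_keys sol ab.1).mp hg) (by simp [hmemk])
    | some ld =>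
      obtain ⟨l, d⟩ := ld
      have hin : (d.get? ab).isSome = true := ((hval ab.1 l d hg).2 ab).mpr ⟨hab, rfl⟩
      cases hd : d.get? ab with
      | none => rw [hd] at hin; simp at hin
      | some _ =>
        have : solStep sol ab = sol := by simp [solStep, hg, hd]
        rw [this, hadd]; exact ⟨hkeys, hnd, hval⟩
  · -- a genuinely new pair
    have hadd : PySem.Set.add P ab = P ++ [ab] := by simp [PySem.Set.add, PySem.Set.contains, hab]
    rw [hadd]
    cases hg : sol.get? ab.1 with
    | none =>
      -- the key ab.1 itself is new
      have hnk : ab.1 ∉ sol.keys := (PySem.Dict.get?_eq_none_iff_not_mem_keys sol ab.1).mp hg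
      have hnotfst : ab.1 ∉ P.map Prod.fst := by rwa [hkeys, PySem.Set.mem_ofList] at hnk
      have hcont : sol.contains ab.1 = false := by
        rw [PySem.Dict.contains_eq_isSome_get?, hg]; rfl
      have hstep : solStep sol ab = sol.insert ab.1 (1, PySem.Dict.empty.insert ab 1) := by
        simp [solStep, hg]
      rw [hstep]
      refine ⟨?_, PySem.Dict.nodup_keys_insert _ _ _ hnd, ?_⟩
      · rw [PySem.Dict.keys_insert_of_not_contains sol _ hcont]
        simp only [List.map_append, List.map_cons, List.map_nil]
        rw [ofList_append_singleton, hkeys]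
        have : PySem.Set.add (PySem.Set.ofList (P.map Prod.fst)) ab.1
            = PySem.Set.ofList (P.map Prod.fst) ++ [ab.1] := by
          simp [PySem.Set.add, PySem.Set.contains, PySem.Set.mem_ofList, hnotfst]
        rw [this]
      · intro a l d hget
        rw [PySem.Dict.get?_insert] at hget
        by_cases hak : a = ab.1
        · rw [if_pos hak] at hget
          injection hget with hget
          injection hget with hl hdd
          subst hl; subst hdd
          have hfilt : P.filter (fun p => p.1 == ab.1) = [] := by
            rw [List.filter_eq_nil_iff]; intro p hp hpe
            exact hnotfst (List.mem_map.mpr ⟨p, hp, by simpa using hpe⟩)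
          constructor
          · rw [hak, List.filter_append, hfilt]; simp
          · intro x
            rw [PySem.Dict.get?_insert]
            by_cases hx : x = ab
            · simp [hx, hak, hab]
            · simp only [if_neg hx, PySem.Dict.get?_empty, Option.isSome_none,
                Bool.false_eq_true, false_iff]
              rintro ⟨hxm, hx1⟩
              rcases List.mem_append.mp hxm with hxm | hxm
              · exact hnotfst (List.mem_map.mpr ⟨x, hxm, by rw [hx1, hak]⟩)
              · exact hx (by simpa using hxm)
        · rw [if_neg hak] at hget
          obtain ⟨hl, hiff⟩ := hval a l d hget
          constructor
          · rw [hl, List.filter_append]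
            have : [ab].filter (fun p => p.1 == a) = [] := by
              simp [show ¬ (ab.1 = a) from fun he => hak he.symm]
            rw [this, List.append_nil]
          · intro x
            rw [hiff]
            constructor
            · rintro ⟨hxm, hx1⟩; exact ⟨List.mem_append_left _ hxm, hx1⟩
            · rintro ⟨hxm, hx1⟩
              rcases List.mem_append.mp hxm with hxm | hxm
              · exact ⟨hxm, hx1⟩
              · exact absurd hx1 (by simp at hxm; rw [hxm]; exact fun he => hak he.symm)
    | some ld =>
      obtain ⟨l, d⟩ := ld
      obtain ⟨hl, hiff⟩ := hval ab.1 l d hg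
      have hdnone : d.get? ab = none := by
        cases hd : d.get? ab with
        | none => rfl
        | some _ =>
          have : ab ∈ P ∧ ab.1 = ab.1 := (hiff ab).mp (by rw [hd]; rfl)
          exact absurd this.1 hab
      have hcont : sol.contains ab.1 = true := by
        rw [PySem.Dict.contains_eq_isSome_get?, hg]; rfl
      have hstep : solStep sol ab = sol.insert ab.1 (l + 1, d.insert ab 1) := by
        simp [solStep, hg, hdnone]
      have hmemfst : ab.1 ∈ P.map Prod.fst := by
        have : ab.1 ∈ sol.keys := by
          rw [PySem.Dict.contains_iff_mem_keys] at hcont; exact hcont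
        rwa [hkeys, PySem.Set.mem_ofList] at this
      rw [hstep]
      refine ⟨?_, PySem.Dict.nodup_keys_insert _ _ _ hnd, ?_⟩
      · rw [PySem.Dict.keys_insert_of_contains sol _ hcont]
        simp only [List.map_append, List.map_cons, List.map_nil]
        rw [ofList_append_singleton, hkeys]
        simp [PySem.Set.add, PySem.Set.contains, PySem.Set.mem_ofList, hmemfst]
      · intro a l' d' hget
        rw [PySem.Dict.get?_insert] at hget
        by_cases hak : a = ab.1
        · rw [if_pos hak] at hget
          injection hget with hget
          injection hget with hl' hdd
          subst hl'; subst hdd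
          constructor
          · rw [hl, hak, List.filter_append]
            simp
          · intro x
            rw [PySem.Dict.get?_insert]
            by_cases hx : x = ab
            · simp [hx, hak, hab]
            · rw [if_neg hx, hiff x]
              constructor
              · rintro ⟨hxm, hx1⟩; exact ⟨List.mem_append_left _ hxm, by rw [hx1, hak]⟩
              · rintro ⟨hxm, hx1⟩
                rcases List.mem_append.mp hxm with hxm | hxm
                · exact ⟨hxm, by rw [hx1, hak]⟩
                · exact absurd (by simpa using hxm) hx
        · rw [if_neg hak] at hget
          obtain ⟨hl', hiff'⟩ := hval a l' d' hget
          constructor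
          · rw [hl', List.filter_append]
            have : [ab].filter (fun p => p.1 == a) = [] := by
              simp [show ¬ (ab.1 = a) from fun he => hak he.symm]
            rw [this, List.append_nil]
          · intro x
            rw [hiff' x]
            constructor
            · rintro ⟨hxm, hx1⟩; exact ⟨List.mem_append_left _ hxm, hx1⟩
            · rintro ⟨hxm, hx1⟩
              rcases List.mem_append.mp hxm with hxm | hxm
              · exact ⟨hxm, hx1⟩
              · exact absurd hx1 (by simp at hxm; rw [hxm]; exact fun he => hak he.symm)

lemma inv_fold (L : List (Int × Int)) :
    ∀ (sol : PySem.Dict Int (Int × PySem.Dict (Int × Int) Int)) (P : List (Int × Int)),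
      InvA sol P → InvA (L.foldl solStep sol) (L.foldl PySem.Set.add P) := by
  induction L with
  | nil => intro sol P h; exact h
  | cons ab L ih =>
    intro sol P h
    exact ih _ _ (inv_step sol P ab h)

lemma inv_empty : InvA PySem.Dict.empty [] := by
  refine ⟨by simp [PySem.Dict.keys_empty, PySem.Set.ofList], by simp [PySem.Dict.keys_empty], ?_⟩
  intro a l d hget
  rw [PySem.Dict.get?_empty] at hget
  exact absurd hget (by simp)

lemma count_eq_filter_length (P : List (Int × Int)) (a : Int) :
    (P.map Prod.fst).count a = (P.filter (fun p => p.1 == a)).length := by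
  rw [List.count_eq_countP, List.countP_map, List.countP_eq_length_filter]
  rfl

-- A's final product, characterised: over the distinct keys, the number of distinct pairs per key
lemma prod_eq_of_inv (sol : PySem.Dict Int (Int × PySem.Dict (Int × Int) Int))
    (P : List (Int × Int)) (h : InvA sol P) :
    sol.values.foldl (fun p v => p * v.1) 1
      = ((PySem.Set.ofList (P.map Prod.fst)).map
          (fun a => (((P.map Prod.fst).count a : Nat) : Int))).foldl (fun p c => p * c) 1 := by
  obtain ⟨hkeys, hnd, hval⟩ := h
  have hA : sol.values = sol.keys.map (fun k => sol.getD k (0, PySem.Dict.empty)) :=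
    PySem.Dict.values_eq_map_keys sol hnd _
  rw [hA, List.foldl_map, List.foldl_map, hkeys]
  apply PySem.List.foldl_congr_mem
  intro acc k hk
  have hk' : k ∈ sol.keys := by rw [hkeys]; exact hk
  have hsome : ∃ l d, sol.get? k = some (l, d) := by
    cases hg : sol.get? k with
    | none => exact absurd ((PySem.Dict.get?_eq_none_iff_not_mem_keys sol k).mp hg) (by simp [hk'])
    | some ld => exact ⟨ld.1, ld.2, congrArg some Prod.mk.eta.symm⟩
  obtain ⟨l, d, hg⟩ := hsome
  rw [PySem.Dict.getD_of_get?_eq_some _ _ hg, (hval k l d hg).1, count_eq_filter_length]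

-- ---- B side: the sort ----

-- lexicographic ≤ on int pairs (Python's tuple order)
def lexLe (p q : Int × Int) : Prop := p.1 < q.1 ∨ (p.1 = q.1 ∧ p.2 ≤ q.2)

lemma lexLe_refl (p : Int × Int) : lexLe p p := Or.inr ⟨rfl, le_refl _⟩

lemma lexLe_antisymm (p q : Int × Int) (h1 : lexLe p q) (h2 : lexLe q p) : p = q := by
  obtain ⟨a, b⟩ := p; obtain ⟨c, d⟩ := q
  rcases h1 with h1 | ⟨h1, h1'⟩ <;> rcases h2 with h2 | ⟨h2, h2'⟩ <;>
    simp_all <;> omega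

-- Python's tuple sort IS the sort by the lexicographic key
lemma sorted2_eq_sorted_lex (xs : List (Int × Int)) :
    PySem.List.sorted2 xs Prod.fst Prod.snd = PySem.List.sorted xs (fun x => toLex x) := by
  rw [PySem.List.sorted_eq_foldl_insertBy]
  show List.foldl (fun acc x => PySem.List.insertBy _ x acc) [] xs = _
  have hbe : (fun (a b : Int × Int) =>
        decide (a.1 < b.1) || (!decide (b.1 < a.1) && decide (a.2 < b.2)))
      = (fun (a b : Int × Int) => decide (toLex a < toLex b)) := by
    funext a b
    by_cases h1 : a.1 < b.1
    · simp [Prod.Lex.lt_iff, h1]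
    · by_cases h2 : b.1 < a.1
      · simp [Prod.Lex.lt_iff, h1, h2, ne_of_gt h2]
      · have h3 : a.1 = b.1 := le_antisymm (not_lt.mp h2) (not_lt.mp h1)
        simp [Prod.Lex.lt_iff, h3]
  rw [hbe]
  simp

lemma sorted_lex_pairwise (xs : List (Int × Int)) :
    (PySem.List.sorted xs (fun x => toLex x)).Pairwise lexLe := by
  have h := PySem.List.sorted_pairwise xs (fun x : Int × Int => toLex x)
  exact h.imp (fun {a b} hab => by
    rcases Prod.Lex.le_iff.mp hab with h | ⟨h, h'⟩
    · exact Or.inl h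
    · exact Or.inr ⟨h, h'⟩)

-- ---- B side: the adjacent-dedup loop on a sorted list ----

-- in a strictly increasing (w.r.t. le∧ne) chain the last element dominates
lemma le_getLast {α : Type} (le : α → α → Prop) (hrefl : ∀ a, le a a) :
    ∀ (u : List α), u.Pairwise (fun a b => le a b ∧ a ≠ b) →
      ∀ b, u.getLast? = some b → ∀ y ∈ u, le y b := by
  intro u
  induction u with
  | nil => intro _ b hb; simp at hb
  | cons x t ih =>
    intro hp b hb y hy
    rcases List.pairwise_cons.mp hp with ⟨hx, ht⟩
    cases t with
    | nil =>
      simp at hb hy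
      subst hb; subst hy; exact hrefl _
    | cons z t' =>
      rw [List.getLast?_cons_cons] at hb
      rcases List.mem_cons.mp hy with hy | hy
      · subst hy
        exact (hx b (List.mem_of_getLast? hb)).1
      · exact ih ht b hb y hy
  
-- the dedupAdj fold on a le-sorted list: strictly increasing output, same members
lemma dedupFold {α : Type} [DecidableEq α] (le : α → α → Prop) (hrefl : ∀ a, le a a)
    (hanti : ∀ a b, le a b → le b a → a = b) :
    ∀ (l u : List α), l.Pairwise le → u.Pairwise (fun a b => le a b ∧ a ≠ b) →
      (∀ y ∈ u, ∀ z ∈ l, le y z) →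
      (l.foldl (fun u x => if u = [] ∨ u.getLast? ≠ some x then u ++ [x] else u) u).Pairwise
          (fun a b => le a b ∧ a ≠ b) ∧
      (∀ x, x ∈ l.foldl (fun u x => if u = [] ∨ u.getLast? ≠ some x then u ++ [x] else u) u ↔
          x ∈ u ∨ x ∈ l) := by
  intro l
  induction l with
  | nil => intro u _ hu _; exact ⟨hu, fun x => by simp⟩
  | cons x l' ih =>
    intro u hl hu hlink
    rcases List.pairwise_cons.mp hl with ⟨hxl', hl'⟩
    simp only [List.foldl_cons]
    by_cases hc : u = [] ∨ u.getLast? ≠ some x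
    · rw [if_pos hc]
      have hyx : ∀ y ∈ u, le y x ∧ y ≠ x := by
        intro y hy
        refine ⟨hlink y hy x (List.mem_cons_self), ?_⟩
        rcases hc with hc | hc
        · subst hc; simp at hy
        · intro hyx; subst hyx
          cases hgl : u.getLast? with
          | none => rw [List.getLast?_eq_none_iff] at hgl; subst hgl; simp at hy
          | some b =>
            have hb : b ∈ u := List.mem_of_getLast? hgl
            have h1 : le y b := le_getLast le hrefl u hu b hgl y hy
            have h2 : le b y := hlink b hb y (List.mem_cons_self)
            rw [hgl] at hc
            exact hc (by rw [hanti b y h2 h1])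
      have hu' : (u ++ [x]).Pairwise (fun a b => le a b ∧ a ≠ b) := by
        rw [List.pairwise_append]
        exact ⟨hu, List.pairwise_singleton _ _, by
          intro y hy x' hx'; simp at hx'; subst hx'; exact hyx y hy⟩
      have hlink' : ∀ y ∈ u ++ [x], ∀ z ∈ l', le y z := by
        intro y hy z hz
        rcases List.mem_append.mp hy with hy | hy
        · exact hlink y hy z (List.mem_cons_of_mem _ hz)
        · simp at hy; subst hy; exact hxl' z hz
      obtain ⟨hp, hm⟩ := ih (u ++ [x]) hl' hu' hlink'
      refine ⟨hp, fun x' => ?_⟩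
      rw [hm x']
      simp [List.mem_append, or_assoc, or_comm, or_left_comm]
    · rw [if_neg hc]
      rw [not_or, not_not] at hc
      obtain ⟨hne, hlast⟩ := hc
      have hxu : x ∈ u := by
        cases hgl : u.getLast? with
        | none => rw [List.getLast?_eq_none_iff] at hgl; exact absurd hgl hne
        | some b =>
          rw [hgl] at hlast
          have : b = x := by injection hlast
          subst this
          exact List.mem_of_getLast? hgl
      have hlink' : ∀ y ∈ u, ∀ z ∈ l', le y z := by
        intro y hy z hz; exact hlink y hy z (List.mem_cons_of_mem _ hz)
      obtain ⟨hp, hm⟩ := ih u hl' hu hlink'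
      refine ⟨hp, fun x' => ?_⟩
      rw [hm x']
      constructor
      · rintro (h | h)
        · exact Or.inl h
        · exact Or.inr (List.mem_cons_of_mem _ h)
      · rintro (h | h)
        · exact Or.inl h
        · rcases List.mem_cons.mp h with h | h
          · subst h; exact Or.inl hxu
          · exact Or.inr h

lemma foldl_mul_eq_prod (l : List Int) : l.foldl (fun p c => p * c) 1 = l.prod := by
  rw [List.prod_eq_foldl]

-- ===== VERDICT (by name: the statement is the Claim_ definition above) =====
theorem count_sol_spec : Claim_equal_count_sol := by
  intro m _ _
  unfold Spec_count_sol count_sol count_sol_alt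
  rw [nested_foldl m solStep PySem.Dict.empty, nested_append m]
  -- names for the intermediate lists
  set Q := flatPairs m with hQ
  set P : List (Int × Int) := PySem.Set.ofList Q with hP
  set FA : List Int := P.map Prod.fst with hFA
  set sQ := PySem.List.sorted2 Q Prod.fst Prod.snd with hsQ
  set U := dedupAdj sQ with hU
  set F : List Int := U.map Prod.fst with hF
  set K := dedupAdj F with hK
  -- A's side via the invariant
  have hinv := inv_fold Q PySem.Dict.empty [] inv_empty
  rw [← PySem.Set.ofList_eq_foldl] at hinv
  have hAeq := prod_eq_of_inv _ _ (by simpa using hinv)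
  rw [hAeq]
  -- B's side: properties of the sort and the two dedup loops
  have hsQ' : sQ = PySem.List.sorted Q (fun x => toLex x) := sorted2_eq_sorted_lex Q
  have hsQpair : sQ.Pairwise lexLe := by rw [hsQ']; exact sorted_lex_pairwise Q
  have hsQmem : ∀ x, x ∈ sQ ↔ x ∈ Q := by
    intro x; rw [hsQ']; exact PySem.List.mem_sorted ..
  have hUprop := dedupFold lexLe lexLe_refl lexLe_antisymm sQ [] hsQpair (List.Pairwise.nil)
    (by intro y hy; simp at hy)
  obtain ⟨hUpair, hUmem⟩ := hUprop
  have hUnodup : U.Nodup := hUpair.imp (fun h => h.2)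
  have hUfold : U = sQ.foldl (fun u x => if u = [] ∨ u.getLast? ≠ some x then u ++ [x] else u) [] := rfl
  have hUmem' : ∀ x, x ∈ U ↔ x ∈ Q := by
    intro x; rw [hUfold, hUmem x]; simp [hsQmem x]
  have hPU : U.Perm P := by
    rw [List.perm_ext_iff_of_nodup hUnodup (PySem.Set.nodup_ofList Q)]
    intro a; rw [hUmem' a, PySem.Set.mem_ofList]
  have hFperm : F.Perm FA := hPU.map Prod.fst
  have hFpair : F.Pairwise (· ≤ ·) := by
    rw [hF, List.pairwise_map]
    exact hUpair.imp (fun {a b} h => by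
      rcases h.1 with h' | ⟨h', _⟩
      · exact le_of_lt h'
      · exact le_of_eq h')
  have hKprop := dedupFold (· ≤ · : Int → Int → Prop) le_refl (fun a b => le_antisymm)
    F [] hFpair (List.Pairwise.nil) (by intro y hy; simp at hy)
  obtain ⟨hKpair, hKmem⟩ := hKprop
  have hKnodup : K.Nodup := hKpair.imp (fun h => h.2)
  have hKfold : K = F.foldl (fun u x => if u = [] ∨ u.getLast? ≠ some x then u ++ [x] else u) [] := rfl
  have hKmem' : ∀ x, x ∈ K ↔ x ∈ F := by
    intro x; rw [hKfold, hKmem x]; simp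
  have hKperm : K.Perm (PySem.Set.ofList FA) := by
    rw [List.perm_ext_iff_of_nodup hKnodup (PySem.Set.nodup_ofList FA)]
    intro a
    rw [hKmem' a, PySem.Set.mem_ofList, hFperm.mem_iff]
  -- assemble: both products are products over permuted lists of equal counts
  have hcount : (fun a => ((PySem.List.count F a : Nat) : Int))
      = (fun a => (((FA.count a : Nat)) : Int)) := by
    funext a
    simp only [PySem.List.count_eq]
    rw [hFperm.count_eq a]
  have hBmap : K.foldl (fun p a => p * (PySem.List.count F a : Int)) 1
      = (K.map (fun a => ((PySem.List.count F a : Nat) : Int))).foldl (fun p c => p * c) 1 := by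
    rw [List.foldl_map]
  rw [hBmap, hcount, foldl_mul_eq_prod, foldl_mul_eq_prod]
  exact (List.Perm.prod_eq ((hKperm).map (fun a => ((FA.count a : Nat) : Int)))).symm
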